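-- pv_equiv track=rewrite | github.com/vmorris/AoC2019 | aoc/day4.py | has_double
-- ===== SOURCE A (Python) =====
-- from collections import defaultdict
--
-- def has_double(password):
--     d = defaultdict(list)
--     c = password[0]
--     d[c].append(1)
--     for _c in password[1:]:
--         if c == _c:
--             d[_c][-1] += 1
--         else:
--             d[_c].append(1)
--         c = _c
--     for d in d.values():
--         if 2 in d:
--             return True
--     return False
--
--
--     '''
--     try:
--         for i in range(len(password)):
--             if password[i] == password[i+1]:
--                 return True
--     except IndexError:
--         return False
--     '''
-- ===== SOURCE B (Python) =====
-- def has_double(password):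
--     i, n = 0, len(password)
--     while i < n:
--         j = i
--         while j < n and password[j] == password[i]:
--             j += 1
--         if j - i == 2:
--             return True
--         i = j
--     return False
-- ===== Notes on version B (the rewrite author's own statement) =====
-- stated objective: simpler
-- what changed: B replaces A's defaultdict of per-character run-length lists plus a second pass over its values with a single two-pointer scan over the string that measures each maximal run in place and returns as soon as one has length exactly 2; A raises IndexError on the empty string, which Pre_ excludes.
import Mathlib
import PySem

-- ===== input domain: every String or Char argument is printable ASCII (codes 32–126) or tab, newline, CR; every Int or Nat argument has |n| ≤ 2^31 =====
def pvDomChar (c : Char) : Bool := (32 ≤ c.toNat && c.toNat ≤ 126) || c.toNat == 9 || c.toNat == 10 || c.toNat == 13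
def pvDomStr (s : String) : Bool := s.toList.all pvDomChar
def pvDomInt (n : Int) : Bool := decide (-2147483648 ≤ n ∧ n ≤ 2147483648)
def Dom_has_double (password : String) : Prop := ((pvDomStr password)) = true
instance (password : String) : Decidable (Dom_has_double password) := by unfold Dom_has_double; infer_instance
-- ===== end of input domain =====

-- B replaces A's defaultdict of run-length lists (plus a second pass over its values) by a
-- single two-pointer scan that measures each maximal run in place; equivalence is proved on
-- non-empty strings (A raises IndexError on ""), where B returns False.

-- ===== PORT A =====
-- d[_c][-1] += 1 : increment the last element of the list (Python's list is nonempty there)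
def pvBumpLast : List Int → List Int
  | [] => []
  | [x] => [x + 1]
  | x :: y :: xs => x :: pvBumpLast (y :: xs)

def has_double (password : String) : Bool :=
  match password.toList with
  | [] => false  -- Python raises IndexError here (password[0]); excluded by Pre_has_double
  | c0 :: rest =>
    -- d = defaultdict(list); c = password[0]; d[c].append(1)
    let d0 : PySem.Dict Char (List Int) := (PySem.Dict.empty).modify c0 [] (· ++ [1])
    -- for _c in password[1:]: …
    let st := rest.foldl (fun (st : PySem.Dict Char (List Int) × Char) _c =>
      if st.2 == _c then (st.1.modify _c [] pvBumpLast, _c)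
      else (st.1.modify _c [] (· ++ [1]), _c)) (d0, c0)
    -- for v in d.values(): if 2 in v: return True
    st.1.values.any (fun v => v.contains (2 : Int))

-- ===== PORT B =====
-- Source B's outer while over i; the inner while advancing j over the current run is the
-- takeWhile/dropWhile split of the remainder.
def pvRunScan : List Char → Bool
  | [] => false
  | c :: cs =>
    if (cs.takeWhile (· == c)).length + 1 == 2 then true
    else pvRunScan (cs.dropWhile (· == c))
termination_by l => l.length
decreasing_by
  simpa using Nat.lt_succ_of_le (List.length_dropWhile_le (· == c) cs)

def has_double_alt (password : String) : Bool := pvRunScan password.toList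

-- ===== PRECONDITION & SPEC =====
-- Pre_ excludes only the empty string, on which A raises IndexError at password[0].
def Pre_has_double (password : String) : Prop := password.toList ≠ []
instance (password : String) : Decidable (Pre_has_double password) := by unfold Pre_has_double; infer_instance
def pvWitness_has_double : String := "1223"

def Spec_has_double (password : String) (out : Bool) : Prop := out = has_double_alt password
instance (password : String) (out : Bool) : Decidable (Spec_has_double password out) := by unfold Spec_has_double; infer_instance

-- ===== CLAIM (what is proved, stated in full; the proofs are below) =====
def Claim_equal_has_double : Prop := ∀ (password : String), Dom_has_double password → Pre_has_double password → Spec_has_double password (has_double password)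

-- ===== LEMMAS AND PROOFS =====

-- run-length decomposition of a character list (the runs Source B's scan visits)
def pvRuns : List Char → List (Char × Int)
  | [] => []
  | c :: cs =>
    (c, ((cs.takeWhile (· == c)).length : Int) + 1) :: pvRuns (cs.dropWhile (· == c))
termination_by l => l.length
decreasing_by
  simpa using Nat.lt_succ_of_le (List.length_dropWhile_le (· == c) cs)

lemma pvBumpLast_append (v : List Int) (n : Int) : pvBumpLast (v ++ [n]) = v ++ [n + 1] := by
  induction v with
  | nil => simp [pvBumpLast]
  | cons x xs ih =>
    cases xs with
    | nil => simp [pvBumpLast]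
    | cons y ys => simpa [pvBumpLast] using ih

lemma pvModify_modify_self (d : PySem.Dict Char (List Int)) (k : Char)
    (f g : List Int → List Int) :
    (d.modify k [] f).modify k [] g = d.modify k [] (fun v => g (f v)) := by
  show ((d.insert k (f (d.getD k []))).insert k
      (g ((d.insert k (f (d.getD k []))).getD k []))) = d.insert k (g (f (d.getD k [])))
  rw [PySem.Dict.getD_insert_self, PySem.Dict.insert_insert_self]

-- the dict-building fold that A's loop amounts to, run over an explicit run list
def pvBuild (d : PySem.Dict Char (List Int)) (rs : List (Char × Int)) :
    PySem.Dict Char (List Int) :=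
  rs.foldl (fun d p => d.modify p.1 [] (· ++ [p.2])) d

-- A's loop, started just after a run of x of length n has been recorded, builds the dict of runs
lemma pvLoop_eq_build (rest : List Char) :
    ∀ (d : PySem.Dict Char (List Int)) (x : Char) (n : Int),
    (rest.foldl (fun (st : PySem.Dict Char (List Int) × Char) _c =>
        if st.2 == _c then (st.1.modify _c [] pvBumpLast, _c)
        else (st.1.modify _c [] (· ++ [1]), _c)) (d.modify x [] (· ++ [n]), x)).1
      = pvBuild d ((x, n + ((rest.takeWhile (· == x)).length : Int)) ::
          pvRuns (rest.dropWhile (· == x))) := by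
  induction rest with
  | nil =>
    intro d x n
    simp [pvBuild, pvRuns]
  | cons y ys ih =>
    intro d x n
    by_cases hxy : x = y
    · subst hxy
      have hb : (fun v => pvBumpLast (v ++ [n])) = (· ++ [n + 1]) := by
        funext v; exact pvBumpLast_append v n
      simp only [List.foldl_cons, beq_self_eq_true, if_true]
      rw [show ((d.modify x [] (· ++ [n])).modify x [] pvBumpLast)
            = d.modify x [] (· ++ [n + 1]) by
          rw [pvModify_modify_self]; simp [hb]]
      rw [ih d x (n + 1)]
      simp only [List.takeWhile_cons, List.dropWhile_cons, beq_self_eq_true, if_true,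
        List.length_cons, pvBuild]
      push_cast
      ring_nf
    · have hne : (x == y) = false := by simp [hxy]
      simp only [List.foldl_cons, hne, Bool.false_eq_true, if_false]
      rw [ih (d.modify x [] (· ++ [n])) y 1]
      have hyx : (y == x) = false := by simp [Ne.symm hxy]
      simp only [pvRuns, List.takeWhile_cons, List.dropWhile_cons, hyx, Bool.false_eq_true, if_false,
        List.length_nil, pvBuild, List.foldl_cons]
      push_cast
      ring_nf

-- membership of 2 among the values of the built dict ↔ some run has length 2
lemma pvCheck_build (rs : List (Char × Int)) :
    ((pvBuild PySem.Dict.empty rs).values.any (fun v => v.contains (2 : Int)))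
      = rs.any (fun p => p.2 == 2) := by
  have hnodup : (pvBuild PySem.Dict.empty rs).keys.Nodup := by
    unfold pvBuild
    exact PySem.Dict.nodup_keys_foldl_modify_key rs (fun p => p.1) []
      (fun _ p => (· ++ [p.2])) PySem.Dict.empty (by simp)
  have hkeys : (pvBuild PySem.Dict.empty rs).keys
      = PySem.Set.update (PySem.Dict.empty : PySem.Dict Char (List Int)).keys (rs.map (fun p => p.1)) := by
    unfold pvBuild
    exact PySem.Dict.keys_foldl_modify_key rs (fun p => p.1) []
      (fun _ p => (· ++ [p.2])) PySem.Dict.empty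
  have hgetD : ∀ c, (pvBuild PySem.Dict.empty rs).getD c []
      = (rs.filter (fun p => p.1 == c)).map (fun p => p.2) := by
    intro c
    unfold pvBuild
    rw [PySem.Dict.getD_foldl_modify_append]
    simp
  rw [PySem.Dict.values_eq_map_keys _ hnodup []]
  rw [List.any_map]
  rcases Bool.eq_false_or_eq_true (rs.any (fun p => p.2 == 2)) with h2 | h2
  swap
  · rw [h2, List.any_eq_false]
    rw [List.any_eq_false] at h2
    intro k _hk
    simp only [Function.comp_apply, hgetD k, List.contains_eq_mem, List.mem_map,
      decide_eq_true_eq, not_exists, not_and]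
    rintro p hp hp2
    have := h2 p (List.mem_of_mem_filter hp)
    simp [hp2] at this
  · rw [h2, List.any_eq_true]
    rw [List.any_eq_true] at h2
    obtain ⟨p, hp, hp2⟩ := h2
    refine ⟨p.1, ?_, ?_⟩
    · rw [hkeys]
      rw [PySem.Set.mem_update]
      exact Or.inr (List.mem_map_of_mem hp)
    · simp only [Function.comp_apply, hgetD p.1, List.contains_eq_mem, List.mem_map,
        decide_eq_true_eq]
      exact ⟨p, List.mem_filter.mpr ⟨hp, by simp⟩, by simpa using hp2⟩

-- B's scan answers "some run has length 2"
lemma pvRunScan_eq_any (l : List Char) :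
    pvRunScan l = (pvRuns l).any (fun p => p.2 == 2) := by
  induction l using pvRunScan.induct with
  | case1 => simp [pvRunScan, pvRuns]
  | case2 c cs h =>
    rw [pvRunScan, pvRuns]
    simp only [if_pos h, List.any_cons]
    have : ((((cs.takeWhile (· == c)).length : Int) + 1) == 2) = true := by
      simp only [beq_iff_eq] at h ⊢
      omega
    simp [this]
  | case3 c cs h ih =>
    rw [pvRunScan, pvRuns]
    simp only [if_neg h, List.any_cons, ih]
    have : ((((cs.takeWhile (· == c)).length : Int) + 1) == 2) = false := by
      simp only [beq_iff_eq] at h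
      simp only [beq_eq_false_iff_ne, ne_eq]
      omega
    simp [this]

-- ===== VERDICT (by name: the statement is the Claim_ definition above) =====
theorem has_double_spec : Claim_equal_has_double := by
  intro password _hdom hpre
  unfold Spec_has_double has_double has_double_alt
  cases hl : password.toList with
  | nil => exact absurd hl hpre
  | cons c0 rest =>
    simp only
    rw [show ((PySem.Dict.empty : PySem.Dict Char (List Int)).modify c0 [] (· ++ [1]))
          = ((PySem.Dict.empty : PySem.Dict Char (List Int)).modify c0 [] (· ++ [(1 : Int)]))
        from rfl]
    rw [pvLoop_eq_build rest PySem.Dict.empty c0 1]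
    rw [show ((c0, (1 : Int) + ((rest.takeWhile (· == c0)).length : Int)) ::
          pvRuns (rest.dropWhile (· == c0))) = pvRuns (c0 :: rest) by
        rw [pvRuns]; ring_nf]
    rw [pvCheck_build, pvRunScan_eq_any]
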